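-- pv_equiv track=rewrite | github.com/junwha0511/ACMICPC | 2630.py | count_square
-- ===== SOURCE A (Python) =====
-- def count_square(g, sx, sy, ex, ey):
--     if sx == ex and sy == ey:
--         if g[sx][sy] == 0:
--             return (1, 0)
--         return (0, 1)
--
--     sub_squares = [
--         count_square(g, sx, sy, (sx+ex)//2, (sy+ey)//2),
--         count_square(g, (sx+ex)//2+1, sy, ex, (sy+ey)//2),
--         count_square(g, sx, (sy+ey)//2+1, (sx+ex)//2, ey),
--         count_square(g, (sx+ex)//2+1, (sy+ey)//2+1, ex, ey),
--     ]
--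
--     w = 0
--     b = 0
--     for i in range(len(sub_squares)):
--         w += sub_squares[i][0]
--         b += sub_squares[i][1]
--
--     if w == 0: # b must be 4
--         return (0, 1)
--     if b == 0:
--         return (1, 0)
--     return (w, b)
-- ===== SOURCE B (Python) =====
-- def count_square(g, sx, sy, ex, ey):
--     # Bottom-up dynamic programming: a table of (white, blue) pair counts for every
--     # aligned block, merged level by level (block side 1, 2, 4, ...) instead of
--     # A's top-down recursion.
--     side = ex - sx + 1
--     table = {}
--     for i in range(sx, ex + 1):
--         for j in range(sy, ey + 1):
--             table[(i, j)] = (1, 0) if g[i][j] == 0 else (0, 1)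
--     s = 1
--     while s < side:
--         nxt = {}
--         for i in range(sx, ex + 1, 2 * s):
--             for j in range(sy, ey + 1, 2 * s):
--                 w = table[(i, j)][0] + table[(i + s, j)][0] + table[(i, j + s)][0] + table[(i + s, j + s)][0]
--                 b = table[(i, j)][1] + table[(i + s, j)][1] + table[(i, j + s)][1] + table[(i + s, j + s)][1]
--                 nxt[(i, j)] = (0, 1) if w == 0 else ((1, 0) if b == 0 else (w, b))
--         table = nxt
--         s *= 2
--     return table[(sx, sy)]
-- ===== Notes on version B (the rewrite author's own statement) =====
-- stated objective: alternative
-- what changed: B replaces A's top-down four-quadrant recursion (with its merge-and-collapse on the way back up) by bottom-up dynamic programming: an explicit table of (white, blue) counts for every aligned block, built for side 1 and merged level by level (side 2, 4, ...) in an iterative loop until one entry for the whole square remains.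
import Mathlib
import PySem

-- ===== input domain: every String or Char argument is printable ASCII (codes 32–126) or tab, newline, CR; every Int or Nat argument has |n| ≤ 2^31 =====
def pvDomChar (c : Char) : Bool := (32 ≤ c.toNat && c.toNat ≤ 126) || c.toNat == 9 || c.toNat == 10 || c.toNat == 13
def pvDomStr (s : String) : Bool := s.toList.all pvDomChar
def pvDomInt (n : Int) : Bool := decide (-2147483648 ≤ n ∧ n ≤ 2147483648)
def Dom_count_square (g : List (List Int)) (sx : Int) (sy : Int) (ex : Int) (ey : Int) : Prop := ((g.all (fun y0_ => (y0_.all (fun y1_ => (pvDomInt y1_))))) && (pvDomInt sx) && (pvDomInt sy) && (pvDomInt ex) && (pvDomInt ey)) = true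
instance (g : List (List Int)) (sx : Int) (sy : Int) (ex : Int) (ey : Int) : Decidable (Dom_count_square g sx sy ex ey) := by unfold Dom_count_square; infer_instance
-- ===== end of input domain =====

-- B replaces A's top-down four-way recursion by bottom-up dynamic programming: an explicit
-- table of (white, blue) counts per aligned block, merged level by level; objective: alternative.

-- ===== PORT A =====
-- g[i][j]; Pre_count_square guarantees both reads are in range (Python raises otherwise)
def pvCell (g : List (List Int)) (i j : Int) : Int :=
  ((PySem.List.pyGet? g i).bind (fun row => PySem.List.pyGet? row j)).getD 0

-- fuel makes the (in general non-terminating) Python recursion total; on every input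
-- admitted by Pre_count_square the fuel given below is never exhausted
def csA (fuel : Nat) (g : List (List Int)) (sx sy ex ey : Int) : Int × Int :=
  match fuel with
  | 0 => (0, 0)
  | f + 1 =>
    if sx = ex ∧ sy = ey then
      if pvCell g sx sy = 0 then (1, 0) else (0, 1)
    else
      let mx := PySem.Int.floordiv (sx + ex) 2
      let my := PySem.Int.floordiv (sy + ey) 2
      let sub_squares := [csA f g sx sy mx my, csA f g (mx + 1) sy ex my,
                          csA f g sx (my + 1) mx ey, csA f g (mx + 1) (my + 1) ex ey]
      let wb := sub_squares.foldl (fun acc p => (acc.1 + p.1, acc.2 + p.2)) (0, 0)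
      if wb.1 = 0 then (0, 1) else if wb.2 = 0 then (1, 0) else wb

def count_square (g : List (List Int)) (sx : Int) (sy : Int) (ex : Int) (ey : Int) : Int × Int :=
  csA ((ex - sx).toNat + 2) g sx sy ex ey

-- ===== PORT B =====
-- the size-1 table: table[(i, j)] = (1, 0) if g[i][j] == 0 else (0, 1)
def bLeaves (g : List (List Int)) (sx sy ex ey : Int) : PySem.Dict (Int × Int) (Int × Int) :=
  (PySem.List.pyRange sx (ex + 1) 1).foldl (fun t i =>
    (PySem.List.pyRange sy (ey + 1) 1).foldl (fun t j =>
      t.insert (i, j) (if pvCell g i j = 0 then (1, 0) else (0, 1))) t) PySem.Dict.empty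

-- one merge level: blocks of side s merged four at a time into blocks of side 2*s
-- (Python's table[(i, j)] raises KeyError on a missing key; Pre_count_square excludes that)
def bMerge (t : PySem.Dict (Int × Int) (Int × Int)) (sx sy ex ey s : Int) :
    PySem.Dict (Int × Int) (Int × Int) :=
  (PySem.List.pyRange sx (ex + 1) (2 * s)).foldl (fun n i =>
    (PySem.List.pyRange sy (ey + 1) (2 * s)).foldl (fun n j =>
      let w := (t.getD (i, j) (0, 0)).1 + (t.getD (i + s, j) (0, 0)).1 +
               (t.getD (i, j + s) (0, 0)).1 + (t.getD (i + s, j + s) (0, 0)).1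
      let b := (t.getD (i, j) (0, 0)).2 + (t.getD (i + s, j) (0, 0)).2 +
               (t.getD (i, j + s) (0, 0)).2 + (t.getD (i + s, j + s) (0, 0)).2
      n.insert (i, j) (if w = 0 then (0, 1) else if b = 0 then (1, 0) else (w, b))) n)
    PySem.Dict.empty

-- while s < side: merge, s *= 2 (fuel only makes the loop total; never exhausted under Pre_)
def bLoop (fuel : Nat) (g : List (List Int)) (sx sy ex ey : Int)
    (t : PySem.Dict (Int × Int) (Int × Int)) (s : Int) : PySem.Dict (Int × Int) (Int × Int) :=
  match fuel with
  | 0 => t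
  | f + 1 =>
    if s < ex - sx + 1 then bLoop f g sx sy ex ey (bMerge t sx sy ex ey s) (2 * s) else t

def count_square_alt (g : List (List Int)) (sx : Int) (sy : Int) (ex : Int) (ey : Int) : Int × Int :=
  match (bLoop ((ex - sx).toNat + 2) g sx sy ex ey (bLeaves g sx sy ex ey) 1).get? (sx, sy) with
  | some v => v
  | none => (0, 0)  -- Python raises KeyError here; Pre_count_square excludes these inputs

-- ===== PRECONDITION & SPEC =====
-- A terminates exactly on square regions whose side is a power of two with every
-- g[i][j] read in range (Python raises IndexError / RecursionError otherwise).
def Pre_count_square (g : List (List Int)) (sx : Int) (sy : Int) (ex : Int) (ey : Int) : Prop :=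
  ∃ k ∈ List.range 32, ex = sx + 2 ^ k - 1 ∧ ey = sy + 2 ^ k - 1 ∧
    ∀ di : Nat, di < 2 ^ k → ∀ dj : Nat, dj < 2 ^ k →
      (((PySem.List.pyGet? g (sx + (di : Int))).bind
        (fun row => PySem.List.pyGet? row (sy + (dj : Int)))).isSome = true)

instance (g : List (List Int)) (sx : Int) (sy : Int) (ex : Int) (ey : Int) : Decidable (Pre_count_square g sx sy ex ey) := by unfold Pre_count_square; infer_instance

def pvWitness_count_square : List (List Int) × Int × Int × Int × Int := ([[0, 1], [1, 1]], 0, 0, 1, 1)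

def Spec_count_square (g : List (List Int)) (sx : Int) (sy : Int) (ex : Int) (ey : Int) (out : Int × Int) : Prop := out = count_square_alt g sx sy ex ey
instance (g : List (List Int)) (sx : Int) (sy : Int) (ex : Int) (ey : Int) (out : Int × Int) : Decidable (Spec_count_square g sx sy ex ey out) := by unfold Spec_count_square; infer_instance

-- ===== CLAIM (what is proved, stated in full; the proofs are below) =====
def Claim_equal_count_square : Prop := ∀ (g : List (List Int)) (sx : Int) (sy : Int) (ex : Int) (ey : Int), Dom_count_square g sx sy ex ey → Pre_count_square g sx sy ex ey → Spec_count_square g sx sy ex ey (count_square g sx sy ex ey)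

-- ===== LEMMAS AND PROOFS =====

lemma get?_rowFold {ν : Type} (ys : List Int) (x : Int) (f : Int → Int → ν)
    (t0 : PySem.Dict (Int × Int) ν) (i j : Int) :
    ((ys.foldl (fun t j' => t.insert (x, j') (f x j')) t0).get? (i, j)) =
      if i = x ∧ j ∈ ys then some (f x j) else t0.get? (i, j) := by
  induction ys generalizing t0 with
  | nil => simp
  | cons y rest ih =>
    simp only [List.foldl_cons]
    rw [ih, PySem.Dict.get?_insert]
    by_cases h1 : i = x <;> by_cases h2 : j = y <;> by_cases h3 : j ∈ rest <;>
      simp [h1, h2, h3, Prod.ext_iff]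

lemma get?_doubleFold {ν : Type} (xs ys : List Int) (f : Int → Int → ν)
    (t0 : PySem.Dict (Int × Int) ν) (i j : Int) :
    ((xs.foldl (fun t i' => ys.foldl (fun t j' => t.insert (i', j') (f i' j')) t) t0).get? (i, j)) =
      if i ∈ xs ∧ j ∈ ys then some (f i j) else t0.get? (i, j) := by
  induction xs generalizing t0 with
  | nil => simp
  | cons x rest ih =>
    simp only [List.foldl_cons]
    rw [ih, get?_rowFold]
    by_cases h1 : i = x <;> by_cases h2 : i ∈ rest <;> by_cases h3 : j ∈ ys <;>
      simp [h1, h2, h3]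

lemma csA_step (f : Nat) (g : List (List Int)) (i j : Int) (m : Nat) :
    csA (f + 1) g i j (i + 2 ^ (m + 1) - 1) (j + 2 ^ (m + 1) - 1) =
      (let r1 := csA f g i j (i + 2 ^ m - 1) (j + 2 ^ m - 1)
       let r2 := csA f g (i + 2 ^ m) j ((i + 2 ^ m) + 2 ^ m - 1) (j + 2 ^ m - 1)
       let r3 := csA f g i (j + 2 ^ m) (i + 2 ^ m - 1) ((j + 2 ^ m) + 2 ^ m - 1)
       let r4 := csA f g (i + 2 ^ m) (j + 2 ^ m) ((i + 2 ^ m) + 2 ^ m - 1) ((j + 2 ^ m) + 2 ^ m - 1)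
       let w := 0 + r1.1 + r2.1 + r3.1 + r4.1
       let b := 0 + r1.2 + r2.2 + r3.2 + r4.2
       if w = 0 then ((0 : Int), (1 : Int)) else if b = 0 then (1, 0) else (w, b)) := by
  have hpos : (0 : Int) < 2 ^ m := pow_pos (by norm_num) m
  have hX : (2 : Int) ^ (m + 1) = 2 * 2 ^ m := by ring
  rw [show i + 2 ^ (m + 1) - 1 = (i + 2 ^ m) + 2 ^ m - 1 from by rw [hX]; ring,
      show j + 2 ^ (m + 1) - 1 = (j + 2 ^ m) + 2 ^ m - 1 from by rw [hX]; ring]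
  have hne : ¬(i = (i + 2 ^ m) + 2 ^ m - 1 ∧ j = (j + 2 ^ m) + 2 ^ m - 1) := by
    rintro ⟨h, -⟩; omega
  have hmx : PySem.Int.floordiv (i + ((i + 2 ^ m) + 2 ^ m - 1)) 2 = i + 2 ^ m - 1 := by
    rw [PySem.Int.floordiv_eq_ediv_of_pos (by norm_num)]; omega
  have hmy : PySem.Int.floordiv (j + ((j + 2 ^ m) + 2 ^ m - 1)) 2 = j + 2 ^ m - 1 := by
    rw [PySem.Int.floordiv_eq_ediv_of_pos (by norm_num)]; omega
  simp only [csA, List.foldl_cons, List.foldl_nil]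
  rw [if_neg hne, hmx, hmy,
      show i + 2 ^ m - 1 + 1 = i + 2 ^ m from by ring,
      show j + 2 ^ m - 1 + 1 = j + 2 ^ m from by ring]

lemma csA_fuel : ∀ (k : Nat) (g : List (List Int)) (i j : Int) (f : Nat), k < f →
    csA f g i j (i + 2 ^ k - 1) (j + 2 ^ k - 1) = csA (k + 1) g i j (i + 2 ^ k - 1) (j + 2 ^ k - 1) := by
  intro k
  induction k with
  | zero =>
    intro g i j f hf
    obtain ⟨fa, rfl⟩ : ∃ fa, f = fa + 1 := ⟨f - 1, by omega⟩
    rw [show i + 2 ^ 0 - 1 = i from by ring, show j + 2 ^ 0 - 1 = j from by ring]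
    simp [csA]
  | succ k ih =>
    intro g i j f hf
    obtain ⟨fa, rfl⟩ : ∃ fa, f = fa + 1 := ⟨f - 1, by omega⟩
    rw [csA_step fa g i j k, csA_step (k + 1) g i j k,
        ih g i j fa (by omega),
        ih g (i + 2 ^ k) j fa (by omega),
        ih g i (j + 2 ^ k) fa (by omega),
        ih g (i + 2 ^ k) (j + 2 ^ k) fa (by omega)]

-- membership in the merge loop's range, as an aligned offset
lemma mem_range_pow_iff (a x : Int) (m r : Nat) :
    (x ∈ PySem.List.pyRange a (a + 2 ^ ((m + 1) + r) - 1 + 1) (2 * 2 ^ m)) ↔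
      ∃ p : Nat, p < 2 ^ r ∧ x = a + (p : Int) * 2 ^ (m + 1) := by
  have hpos : (0 : Int) < 2 * 2 ^ m := by positivity
  have hstep : (2 : Int) * 2 ^ m = 2 ^ (m + 1) := by ring
  have hsplit : (2 : Int) ^ ((m + 1) + r) = 2 ^ (m + 1) * 2 ^ r := by rw [pow_add]
  rw [PySem.List.mem_pyRange_iff_of_pos hpos]
  constructor
  · rintro ⟨h1, h2, c, hc⟩
    have hc0 : 0 ≤ c := by
      by_contra hneg
      have := mul_neg_of_pos_of_neg hpos (lt_of_not_ge hneg)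
      omega
    have hcb : c < 2 ^ r := by
      have h3 : (2 * 2 ^ m) * c < (2 * 2 ^ m) * 2 ^ r := by
        rw [hstep, ← hsplit] at *
        omega
      exact lt_of_mul_lt_mul_left h3 (le_of_lt hpos)
    refine ⟨c.toNat, ?_, ?_⟩
    · have hcast : ((2 ^ r : Nat) : Int) = 2 ^ r := by push_cast; ring
      omega
    · have : ((c.toNat : Nat) : Int) = c := by omega
      rw [this, show (c : Int) * 2 ^ (m + 1) = (2 * 2 ^ m) * c from by rw [hstep]; ring]
      omega
  · rintro ⟨p, hp, rfl⟩
    have hp0 : (0 : Int) ≤ (p : Int) * 2 ^ (m + 1) := by positivity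
    have hpb : (p : Int) * 2 ^ (m + 1) < 2 ^ r * 2 ^ (m + 1) := by
      have : ((p : Int)) < 2 ^ r := by
        have hcast : ((2 ^ r : Nat) : Int) = 2 ^ r := by push_cast; ring
        omega
      exact mul_lt_mul_of_pos_right this (by positivity)
    refine ⟨by omega, by nlinarith, ⟨(p : Int), by rw [hstep]; ring⟩⟩

lemma dp_loop : ∀ (mrem : Nat) (g : List (List Int)) (sx sy : Int) (m : Nat)
    (t : PySem.Dict (Int × Int) (Int × Int)) (f : Nat), mrem < f →
    (∀ i j : Int, t.get? (i, j) =
      if ∃ p < 2 ^ mrem, ∃ q < 2 ^ mrem,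
          i = sx + ((p : Nat) : Int) * 2 ^ m ∧ j = sy + ((q : Nat) : Int) * 2 ^ m
      then some (csA (m + 1) g i j (i + 2 ^ m - 1) (j + 2 ^ m - 1)) else none) →
    ∀ i j : Int,
      (bLoop f g sx sy (sx + 2 ^ (m + mrem) - 1) (sy + 2 ^ (m + mrem) - 1) t (2 ^ m)).get? (i, j) =
        if i = sx ∧ j = sy
        then some (csA (m + mrem + 1) g sx sy (sx + 2 ^ (m + mrem) - 1) (sy + 2 ^ (m + mrem) - 1))
        else none := by
  intro mrem
  induction mrem with
  | zero =>
    intro g sx sy m t f hf ht i j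
    obtain ⟨fa, rfl⟩ : ∃ fa, f = fa + 1 := ⟨f - 1, by omega⟩
    simp only [bLoop, Nat.add_zero]
    rw [if_neg (by omega)]
    rw [ht i j]
    by_cases h : i = sx ∧ j = sy
    · obtain ⟨rfl, rfl⟩ := h
      rw [if_pos ⟨0, by norm_num, 0, by norm_num, by norm_num, by norm_num⟩, if_pos ⟨rfl, rfl⟩]
    · rw [if_neg ?_, if_neg h]
      rintro ⟨p, hp, q, hq, rfl, rfl⟩
      norm_num at hp hq
      subst hp hq
      exact h ⟨by norm_num, by norm_num⟩
  | succ mrem ih =>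
    intro g sx sy m t f hf ht i j
    obtain ⟨fa, rfl⟩ : ∃ fa, f = fa + 1 := ⟨f - 1, by omega⟩
    have hX : (2 : Int) ^ (m + (mrem + 1)) = 2 ^ m * 2 ^ (mrem + 1) := by rw [pow_add]
    have hm1 : (1 : Int) < 2 ^ (mrem + 1) := by
      have : (2 : Int) ^ 1 ≤ 2 ^ (mrem + 1) := pow_le_pow_right₀ (by norm_num) (by omega)
      norm_num at this; omega
    have hmp : (0 : Int) < 2 ^ m := pow_pos (by norm_num) m
    simp only [bLoop]
    rw [if_pos (by nlinarith)]
    rw [show (2 : Int) * 2 ^ m = 2 ^ (m + 1) from by ring,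
        show m + (mrem + 1) = (m + 1) + mrem from by omega]
    refine ih g sx sy (m + 1) _ fa (by omega) ?_ i j
    -- the merged table satisfies the invariant one level up
    intro i' j'
    unfold bMerge
    dsimp only
    rw [get?_doubleFold]
    rw [PySem.Dict.get?_empty]
    by_cases hmem : ∃ p < 2 ^ mrem, ∃ q < 2 ^ mrem,
        i' = sx + ((p : Nat) : Int) * 2 ^ (m + 1) ∧ j' = sy + ((q : Nat) : Int) * 2 ^ (m + 1)
    · obtain ⟨p, hp, q, hq, rfl, rfl⟩ := hmem
      have hcond : ∃ p' < 2 ^ mrem, ∃ q' < 2 ^ mrem,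
          sx + ((p : Nat) : Int) * 2 ^ (m + 1) = sx + ((p' : Nat) : Int) * 2 ^ (m + 1) ∧
          sy + ((q : Nat) : Int) * 2 ^ (m + 1) = sy + ((q' : Nat) : Int) * 2 ^ (m + 1) :=
        ⟨p, hp, q, hq, rfl, rfl⟩
      rw [if_pos ⟨(mem_range_pow_iff sx _ m mrem).mpr ⟨p, hp, rfl⟩,
                  (mem_range_pow_iff sy _ m mrem).mpr ⟨q, hq, rfl⟩⟩,
          if_pos hcond]
      -- evaluate the four lookups via the level-m invariant
      have look : ∀ (a b : Int) (pa qa : Nat), pa < 2 ^ (mrem + 1) → qa < 2 ^ (mrem + 1) →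
          a = sx + (pa : Int) * 2 ^ m → b = sy + (qa : Int) * 2 ^ m →
          t.getD (a, b) (0, 0) = csA (m + 1) g a b (a + 2 ^ m - 1) (b + 2 ^ m - 1) := by
        intro a b pa qa hpa hqa ha hb
        rw [PySem.Dict.getD_eq_get?_getD, ht a b, if_pos ⟨pa, hpa, qa, hqa, ha, hb⟩]
        rfl
      have e1 := look (sx + (p : Int) * 2 ^ (m + 1)) (sy + (q : Int) * 2 ^ (m + 1))
        (2 * p) (2 * q) (by omega) (by omega) (by push_cast; ring) (by push_cast; ring)
      have e2 := look (sx + (p : Int) * 2 ^ (m + 1) + 2 ^ m) (sy + (q : Int) * 2 ^ (m + 1))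
        (2 * p + 1) (2 * q) (by omega) (by omega) (by push_cast; ring) (by push_cast; ring)
      have e3 := look (sx + (p : Int) * 2 ^ (m + 1)) (sy + (q : Int) * 2 ^ (m + 1) + 2 ^ m)
        (2 * p) (2 * q + 1) (by omega) (by omega) (by push_cast; ring) (by push_cast; ring)
      have e4 := look (sx + (p : Int) * 2 ^ (m + 1) + 2 ^ m) (sy + (q : Int) * 2 ^ (m + 1) + 2 ^ m)
        (2 * p + 1) (2 * q + 1) (by omega) (by omega) (by push_cast; ring) (by push_cast; ring)
      rw [e1, e2, e3, e4, csA_step (m + 1) g _ _ m]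
      simp only [zero_add]
    · rw [if_neg hmem, if_neg ?_]
      rintro ⟨hx, hy⟩
      obtain ⟨p, hp, hxe⟩ := (mem_range_pow_iff sx _ m mrem).mp hx
      obtain ⟨q, hq, hye⟩ := (mem_range_pow_iff sy _ m mrem).mp hy
      exact hmem ⟨p, hp, q, hq, hxe, hye⟩

lemma leaves_inv (g : List (List Int)) (sx sy : Int) (k : Nat) (i j : Int) :
    (bLeaves g sx sy (sx + 2 ^ k - 1) (sy + 2 ^ k - 1)).get? (i, j) =
      if ∃ p < 2 ^ k, ∃ q < 2 ^ k,
          i = sx + ((p : Nat) : Int) * 2 ^ 0 ∧ j = sy + ((q : Nat) : Int) * 2 ^ 0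
      then some (csA (0 + 1) g i j (i + 2 ^ 0 - 1) (j + 2 ^ 0 - 1)) else none := by
  unfold bLeaves
  rw [get?_doubleFold, PySem.Dict.get?_empty]
  simp only [pow_zero, mul_one]
  have hcast : ((2 ^ k : Nat) : Int) = 2 ^ k := by push_cast; ring
  by_cases h : ∃ p < 2 ^ k, ∃ q < 2 ^ k, i = sx + ((p : Nat) : Int) ∧ j = sy + ((q : Nat) : Int)
  · obtain ⟨p, hp, q, hq, rfl, rfl⟩ := h
    have hcond : ∃ p' < 2 ^ k, ∃ q' < 2 ^ k,
        sx + ((p : Nat) : Int) = sx + ((p' : Nat) : Int) ∧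
        sy + ((q : Nat) : Int) = sy + ((q' : Nat) : Int) := ⟨p, hp, q, hq, rfl, rfl⟩
    rw [if_pos ⟨by rw [PySem.List.mem_pyRange_one]; exact ⟨by omega, by omega⟩,
                by rw [PySem.List.mem_pyRange_one]; exact ⟨by omega, by omega⟩⟩,
        if_pos hcond]
    rw [show sx + (p : Int) + 1 - 1 = sx + (p : Int) from by ring,
        show sy + (q : Int) + 1 - 1 = sy + (q : Int) from by ring]
    simp [csA]
  · rw [if_neg h, if_neg ?_]
    rintro ⟨hx, hy⟩
    rw [PySem.List.mem_pyRange_one] at hx hy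
    exact h ⟨(i - sx).toNat, by omega, (j - sy).toNat, by omega, by omega, by omega⟩

-- ===== VERDICT (by name: the statement is the Claim_ definition above) =====
theorem count_square_spec : Claim_equal_count_square := by
  intro g sx sy ex ey _ hPre
  obtain ⟨k, -, hex, hey, -⟩ := hPre
  subst hex hey
  unfold Spec_count_square count_square count_square_alt
  have hcast : ((2 ^ k : Nat) : Int) = 2 ^ k := by push_cast; ring
  have hkp : k < 2 ^ k := Nat.lt_two_pow_self
  have hfuel : k < (sx + 2 ^ k - 1 - sx).toNat + 2 := by omega
  have hloop := dp_loop k g sx sy 0 (bLeaves g sx sy (sx + 2 ^ k - 1) (sy + 2 ^ k - 1))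
    ((sx + 2 ^ k - 1 - sx).toNat + 2) hfuel (leaves_inv g sx sy k) sx sy
  rw [pow_zero, Nat.zero_add] at hloop
  rw [hloop, if_pos ⟨rfl, rfl⟩]
  exact csA_fuel k g sx sy _ hfuel
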